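-- pv_equiv track=rewrite | github.com/Viomnz/Zero-OS | src/zero_os/semantic_reasoner.py | semantic_action_roles
-- ===== SOURCE A (Python) =====
-- from typing import Any
--
-- _ROLE_ALIASES = {
--     "get": "retrieve",
--     "retrieve": "retrieve",
--     "fetch": "retrieve",
--     "load": "retrieve",
--     "read": "inspect",
--     "check": "inspect",
--     "verify": "inspect",
--     "inspect": "inspect",
--     "status": "inspect",
--     "health": "inspect",
--     "show": "present",
--     "display": "present",
--     "output": "present",
--     "open": "initiate",
--     "launch": "initiate",
--     "start": "initiate",
--     "click": "mutate",
--     "submit": "mutate",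
--     "input": "mutate",
--     "type": "mutate",
--     "deploy": "deploy",
--     "install": "install",
--     "configure": "configure",
--     "set": "configure",
--     "plan": "plan",
--     "reply": "respond",
--     "post": "respond",
--     "comment": "respond",
--     "act": "mutate",
--     "repair": "remediate",
--     "fix": "remediate",
--     "recover": "remediate",
--     "recovery": "remediate",
--     "repairing": "remediate",
-- }
--
-- _ROLE_PRIORITY = {
--     "inspect": 0,
--     "retrieve": 1,
--     "present": 2,
--     "configure": 3,
--     "initiate": 4,
--     "deploy": 5,
--     "install": 6,
--     "respond": 7,
--     "mutate": 8,
--     "remediate": 9,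
--     "plan": 10,
-- }
--
-- def _normalize_role(token: str) -> str:
--     return _ROLE_ALIASES.get(str(token or "").strip().lower(), "")
--
-- def semantic_action_roles(text: str, decomposition: list[dict[str, Any]] | None = None) -> list[str]:
--     roles: list[str] = []
--     seen: set[str] = set()
--     for subgoal in list(decomposition or []):
--         for action in list(subgoal.get("action_hints", [])):
--             role = _normalize_role(str(action))
--             if role and role not in seen:
--                 seen.add(role)
--                 roles.append(role)
--     lowered = str(text or "").lower()
--     for token, role in _ROLE_ALIASES.items():
--         if f" {token} " in f" {lowered} " and role not in seen:
--             seen.add(role)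
--             roles.append(role)
--     return sorted(roles, key=lambda role: (_ROLE_PRIORITY.get(role, 99), role))
-- ===== SOURCE B (Python) =====
-- from typing import Any
--
-- # reverse index: each semantic role, in priority order, with the alias tokens that name it
-- _ROLE_TOKENS = [
--     ("inspect", ["read", "check", "verify", "inspect", "status", "health"]),
--     ("retrieve", ["get", "retrieve", "fetch", "load"]),
--     ("present", ["show", "display", "output"]),
--     ("configure", ["configure", "set"]),
--     ("initiate", ["open", "launch", "start"]),
--     ("deploy", ["deploy"]),
--     ("install", ["install"]),
--     ("respond", ["reply", "post", "comment"]),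
--     ("mutate", ["click", "submit", "input", "type", "act"]),
--     ("remediate", ["repair", "fix", "recover", "recovery", "repairing"]),
--     ("plan", ["plan"]),
-- ]
--
-- def semantic_action_roles(text: str, decomposition: list[dict[str, Any]] | None = None) -> list[str]:
--     # gather every candidate word once: normalized action hints plus the space-split
--     # words of the padded lowered text (the padding makes ' token ' substring hits = word hits)
--     words = {str(a or "").strip().lower()
--              for sg in (decomposition or [])
--              for a in sg.get("action_hints", [])}
--     words.update(f' {str(text or "").lower()} '.split(' '))
--     # _ROLE_TOKENS is already in (priority, role) order and priorities are distinct,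
--     # so filtering it reproduces A's sorted output without sorting
--     return [role for role, tokens in _ROLE_TOKENS if any(t in words for t in tokens)]
-- ===== Notes on version B (the rewrite author's own statement) =====
-- stated objective: alternative
-- what changed: B inverts the alias dict into a reverse index grouped by role in priority order, gathers all candidate words once (normalized hints plus the space-split words of the padded lowered text, replacing the per-alias substring scan), and emits the output by filtering the fixed priority-ordered role list instead of accumulating roles with a seen-set and sorting, which is exact because the (priority, role) sort key is injective and all priorities are distinct.
import Mathlib
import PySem

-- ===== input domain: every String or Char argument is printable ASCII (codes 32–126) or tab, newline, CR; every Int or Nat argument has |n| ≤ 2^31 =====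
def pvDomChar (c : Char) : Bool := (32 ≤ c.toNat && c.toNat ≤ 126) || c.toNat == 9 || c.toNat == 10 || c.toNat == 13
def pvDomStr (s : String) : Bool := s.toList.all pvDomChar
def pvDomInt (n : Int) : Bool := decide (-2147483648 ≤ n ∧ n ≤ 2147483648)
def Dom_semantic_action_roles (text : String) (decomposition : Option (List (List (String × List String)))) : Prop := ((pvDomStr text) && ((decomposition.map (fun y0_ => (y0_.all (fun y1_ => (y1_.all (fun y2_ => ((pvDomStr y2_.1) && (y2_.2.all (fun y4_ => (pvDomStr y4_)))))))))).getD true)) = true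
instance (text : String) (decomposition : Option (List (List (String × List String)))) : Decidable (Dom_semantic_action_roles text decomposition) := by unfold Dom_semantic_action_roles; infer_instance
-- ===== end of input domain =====

-- B inverts the alias table into a reverse index grouped by role in priority order, gathers all
-- candidate words once (normalized hints + space-split words of the padded lowered text), and
-- emits the result by filtering the fixed priority-ordered role list instead of accumulating
-- roles with a seen-set and sorting; objective: alternative.

-- ===== PORT A =====

def pvAliases : List (List Char × String) := [
  ("get".toList, "retrieve"), ("retrieve".toList, "retrieve"), ("fetch".toList, "retrieve"), ("load".toList, "retrieve"),
  ("read".toList, "inspect"), ("check".toList, "inspect"), ("verify".toList, "inspect"), ("inspect".toList, "inspect"),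
  ("status".toList, "inspect"), ("health".toList, "inspect"),
  ("show".toList, "present"), ("display".toList, "present"), ("output".toList, "present"),
  ("open".toList, "initiate"), ("launch".toList, "initiate"), ("start".toList, "initiate"),
  ("click".toList, "mutate"), ("submit".toList, "mutate"), ("input".toList, "mutate"), ("type".toList, "mutate"),
  ("deploy".toList, "deploy"), ("install".toList, "install"), ("configure".toList, "configure"), ("set".toList, "configure"),
  ("plan".toList, "plan"), ("reply".toList, "respond"), ("post".toList, "respond"), ("comment".toList, "respond"),
  ("act".toList, "mutate"), ("repair".toList, "remediate"), ("fix".toList, "remediate"), ("recover".toList, "remediate"),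
  ("recovery".toList, "remediate"), ("repairing".toList, "remediate")]

def pvPriority : PySem.Dict String Int := PySem.Dict.mk [
  ("inspect", 0), ("retrieve", 1), ("present", 2), ("configure", 3), ("initiate", 4),
  ("deploy", 5), ("install", 6), ("respond", 7), ("mutate", 8), ("remediate", 9), ("plan", 10)]

def pvNormalize (token : String) : String :=
  (PySem.Dict.mk pvAliases).getD (PySem.Chars.lower (PySem.Chars.strip token.toList)) ""

def semantic_action_roles (text : String) (decomposition : Option (List (List (String × List String)))) : List String :=
  let s1 := (decomposition.getD []).foldl
      (fun st subgoal =>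
        ((PySem.Dict.mk subgoal).getD "action_hints" []).foldl
          (fun st action =>
            let role := pvNormalize action
            if role ≠ "" ∧ ¬ (PySem.Set.contains st.2 role = true)
            then (st.1 ++ [role], PySem.Set.add st.2 role) else st)
          st)
      (([] : List String), (PySem.Set.empty : PySem.Set String))
  let lowered := PySem.Chars.lower text.toList
  let s2 := pvAliases.foldl
      (fun st tr =>
        if PySem.Chars.isIn (' ' :: tr.1 ++ [' ']) (' ' :: lowered ++ [' ']) = true ∧ ¬ (PySem.Set.contains st.2 tr.2 = true)
        then (st.1 ++ [tr.2], PySem.Set.add st.2 tr.2) else st)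
      s1
  PySem.List.sorted2 s2.1 (fun role => pvPriority.getD role 99) (fun role => role)

-- ===== PORT B =====
-- reverse index: each semantic role, in priority order, with the alias tokens that name it
def pvRoleTokens : List (String × List (List Char)) := [
  ("inspect", ["read".toList, "check".toList, "verify".toList, "inspect".toList, "status".toList, "health".toList]),
  ("retrieve", ["get".toList, "retrieve".toList, "fetch".toList, "load".toList]),
  ("present", ["show".toList, "display".toList, "output".toList]),
  ("configure", ["configure".toList, "set".toList]),
  ("initiate", ["open".toList, "launch".toList, "start".toList]),
  ("deploy", ["deploy".toList]),
  ("install", ["install".toList]),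
  ("respond", ["reply".toList, "post".toList, "comment".toList]),
  ("mutate", ["click".toList, "submit".toList, "input".toList, "type".toList, "act".toList]),
  ("remediate", ["repair".toList, "fix".toList, "recover".toList, "recovery".toList, "repairing".toList]),
  ("plan", ["plan".toList])]

def semantic_action_roles_alt (text : String) (decomposition : Option (List (List (String × List String)))) : List String :=
  let hintWords : List (List Char) :=
    (decomposition.getD []).flatMap (fun sg =>
      ((PySem.Dict.mk sg).getD "action_hints" []).map
        (fun a => PySem.Chars.lower (PySem.Chars.strip a.toList)))
  let words : PySem.Set (List Char) :=
    PySem.Set.update (PySem.Set.ofList hintWords)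
      (PySem.Chars.splitOn (' ' :: PySem.Chars.lower text.toList ++ [' ']) [' '])
  (pvRoleTokens.filter (fun rt => rt.2.any (fun t => PySem.Set.contains words t))).map Prod.fst

-- ===== PRECONDITION & SPEC =====
def Spec_semantic_action_roles (text : String) (decomposition : Option (List (List (String × List String)))) (out : List String) : Prop := out = semantic_action_roles_alt text decomposition
instance (text : String) (decomposition : Option (List (List (String × List String)))) (out : List String) : Decidable (Spec_semantic_action_roles text decomposition out) := by unfold Spec_semantic_action_roles; infer_instance

-- ===== CLAIM (what is proved, stated in full; the proofs are below) =====
def Claim_equal_semantic_action_roles : Prop := ∀ (text : String) (decomposition : Option (List (List (String × List String)))), Dom_semantic_action_roles text decomposition → Spec_semantic_action_roles text decomposition (semantic_action_roles text decomposition)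

-- ===== LEMMAS AND PROOFS =====
-- `fsp` is a clean structural recursion equal to PySem.Chars.splitOn on the single-space
-- separator; the key fact is:  " w " is an infix of the padded text  ↔  w is one of the
-- split tokens (for a nonempty space-free w).

def fsp : List Char → List (List Char)
  | [] => [[]]
  | c :: rest =>
      if c = ' ' then [] :: fsp rest
      else match fsp rest with
        | t :: ts => (c :: t) :: ts
        | [] => [[c]]

theorem fsp_ne_nil (u : List Char) : fsp u ≠ [] := by
  cases u with
  | nil => simp [fsp]
  | cons c rest =>
      simp only [fsp]
      split
      · simp
      · split <;> simp_all

theorem go_eq (fuel : Nat) (u cur : List Char) (acc : List (List Char))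
    (h : u.length < fuel) :
    PySem.Chars.splitOn.go [' '] fuel u cur acc =
      acc.reverse ++ (match fsp u with
        | [] => []
        | t :: ts => (cur.reverse ++ t) :: ts) := by
  induction fuel generalizing u cur acc with
  | zero => omega
  | succ n ih =>
      cases u with
      | nil => simp [PySem.Chars.splitOn.go, fsp]
      | cons c rest =>
          by_cases hc : c = ' '
          · subst hc
            have : PySem.Chars.splitOn.go [' '] (n+1) (' ' :: rest) cur acc =
                PySem.Chars.splitOn.go [' '] n rest [] (cur.reverse :: acc) := by
              simp [PySem.Chars.splitOn.go, List.isPrefixOf]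
            rw [this, ih _ _ _ (by simp at h ⊢; omega)]
            obtain ⟨t, ts, hts⟩ : ∃ t ts, fsp rest = t :: ts := by
              cases hr : fsp rest with
              | nil => exact absurd hr (fsp_ne_nil rest)
              | cons t ts => exact ⟨t, ts, rfl⟩
            simp [fsp, hts]
          · have : PySem.Chars.splitOn.go [' '] (n+1) (c :: rest) cur acc =
                PySem.Chars.splitOn.go [' '] n rest (c :: cur) acc := by
              simp [PySem.Chars.splitOn.go, List.isPrefixOf, show ((' ' == c) = false) from by simp [Ne.symm hc]]
            rw [this, ih _ _ _ (by simp at h ⊢; omega)]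
            obtain ⟨t, ts, hts⟩ : ∃ t ts, fsp rest = t :: ts := by
              cases hr : fsp rest with
              | nil => exact absurd hr (fsp_ne_nil rest)
              | cons t ts => exact ⟨t, ts, rfl⟩
            simp [fsp, hc, hts]

theorem splitOn_eq_fsp (u : List Char) : PySem.Chars.splitOn u [' '] = fsp u := by
  rw [PySem.Chars.splitOn, go_eq _ _ _ _ (by omega)]
  obtain ⟨t, ts, hts⟩ : ∃ t ts, fsp u = t :: ts := by
    cases hr : fsp u with
    | nil => exact absurd hr (fsp_ne_nil u)
    | cons t ts => exact ⟨t, ts, rfl⟩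
  simp [hts]

theorem fsp_word_cons (w B : List Char) (hsp : ' ' ∉ w) :
    fsp (w ++ ' ' :: B) = w :: fsp B := by
  induction w with
  | nil => simp [fsp]
  | cons a w ih =>
      have ha : a ≠ ' ' := fun h => hsp (h ▸ List.mem_cons_self)
      have ih' := ih (fun h => hsp (List.mem_cons_of_mem _ h))
      simp [fsp, ha, ih']

theorem fsp_tail_step (a : Char) (u : List Char) (x : List Char)
    (h : x ∈ (fsp u).tail) : x ∈ (fsp (a :: u)).tail := by
  by_cases ha : a = ' '
  · subst ha
    simp only [fsp, if_pos rfl, List.tail_cons]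
    exact List.mem_of_mem_tail h
  · obtain ⟨t, ts, hts⟩ : ∃ t ts, fsp u = t :: ts := by
      cases hr : fsp u with
      | nil => exact absurd hr (fsp_ne_nil u)
      | cons t ts => exact ⟨t, ts, rfl⟩
    simp only [fsp, if_neg ha, hts, List.tail_cons]
    rw [hts] at h
    simpa using h

theorem fsp_tail_mem (A u : List Char) (x : List Char)
    (h : x ∈ (fsp u).tail) : x ∈ (fsp (A ++ u)).tail := by
  induction A with
  | nil => simpa using h
  | cons a A ih => exact fsp_tail_step a (A ++ u) x ih

theorem mem_fsp_of_infix (w s : List Char) (hw : w ≠ []) (hsp : ' ' ∉ w)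
    (h : (' ' :: w ++ [' ']) <:+: (' ' :: s ++ [' '])) :
    w ∈ fsp (' ' :: s ++ [' ']) := by
  obtain ⟨A, B, hAB⟩ := h
  have heq : ' ' :: s ++ [' '] = A ++ (' ' :: (w ++ ' ' :: B)) := by
    rw [← hAB]; simp
  have hmem : w ∈ (fsp (' ' :: (w ++ ' ' :: B))).tail := by
    simp only [fsp, if_pos rfl, List.tail_cons, fsp_word_cons w B hsp]
    exact List.mem_cons_self
  have := fsp_tail_mem A _ w hmem
  rw [← heq] at this
  exact List.mem_of_mem_tail this

theorem fsp_head (u : List Char) (t : List Char) (ts : List (List Char))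
    (h : fsp u = t :: ts) : (u = t ∧ ts = []) ∨ ∃ r, u = t ++ ' ' :: r ∧ fsp r = ts := by
  induction u generalizing t ts with
  | nil =>
      rw [show fsp [] = [[]] from rfl] at h
      injection h with h1 h2
      exact Or.inl ⟨h1, h2.symm⟩
  | cons c rest ih =>
      by_cases hc : c = ' '
      · subst hc
        simp only [fsp, if_pos rfl] at h
        obtain ⟨h1, h2⟩ := List.cons.injEq .. ▸ h
        exact Or.inr ⟨rest, by simp [← h1], by rw [← h2]⟩
      · obtain ⟨t', ts', hts⟩ : ∃ t' ts', fsp rest = t' :: ts' := by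
          cases hr : fsp rest with
          | nil => exact absurd hr (fsp_ne_nil rest)
          | cons a b => exact ⟨a, b, rfl⟩
        simp only [fsp, if_neg hc, hts] at h
        obtain ⟨h1, h2⟩ := List.cons.injEq .. ▸ h
        rcases ih t' ts' hts with ⟨hu, hts'⟩ | ⟨r, hur, hfr⟩
        · exact Or.inl ⟨by rw [← h1, ← hu], by rw [← h2, hts']⟩
        · exact Or.inr ⟨r, by rw [← h1, hur]; simp, by rw [← h2, hfr]⟩

theorem infix_of_mem_fsp_aux (w : List Char) (hw : w ≠ []) (hsp : ' ' ∉ w) :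
    ∀ (n : Nat) (u : List Char), u.length ≤ n → (∃ s, u = s ++ [' ']) →
      w ∈ fsp u → (' ' :: w ++ [' ']) <:+: (' ' :: u) := by
  intro n
  induction n with
  | zero => intro u hu ⟨s, hs⟩ _; subst hs; simp at hu
  | succ n ih =>
      intro u hu ⟨s, hs⟩ hmem
      obtain ⟨t, ts, hts⟩ : ∃ t ts, fsp u = t :: ts := by
        cases hr : fsp u with
        | nil => exact absurd hr (fsp_ne_nil u)
        | cons a b => exact ⟨a, b, rfl⟩
      rw [hts] at hmem
      rcases List.mem_cons.mp hmem with hwt | hwts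
      · subst hwt
        rcases fsp_head u w ts hts with ⟨hu', _⟩ | ⟨r, hur, _⟩
        · exact absurd (by rw [← hu', hs]; simp : ' ' ∈ w) hsp
        · refine ⟨[], r, ?_⟩
          rw [hur]; simp
      · rcases fsp_head u t ts hts with ⟨_, hts'⟩ | ⟨r, hur, hfr⟩
        · rw [hts'] at hwts; simp at hwts
        · have hrne : r ≠ [] := by
            rintro rfl
            rw [fsp] at hfr
            rw [← hfr] at hwts
            simp at hwts
            exact hw hwts
          obtain ⟨r', c, hr'c⟩ := r.eq_nil_or_concat.resolve_left hrne
          have hc : c = ' ' := by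
            have h1 : u.getLast? = some ' ' := by rw [hs]; simp
            have h2 : u.getLast? = some c := by
              have hu2 : u = (t ++ ' ' :: r') ++ [c] := by rw [hur, hr'c]; simp
              rw [hu2]
              exact List.getLast?_concat
            rw [h1] at h2; injection h2 with h3; exact h3.symm
          obtain ⟨r', hr'⟩ : ∃ r'', r = r'' ++ [' '] := ⟨r', by rw [hr'c, hc, List.concat_eq_append]⟩
          have hlen : r.length ≤ n := by
            have : u.length = t.length + 1 + r.length := by rw [hur]; simp; omega
            omega
          have hin := ih r hlen ⟨r', hr'⟩ (by rw [← hfr] at hwts; exact hwts)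
          have hsuf : (' ' :: r) <:+ (' ' :: u) := by
            refine ⟨' ' :: t, ?_⟩
            rw [hur]; simp
          exact hin.trans hsuf.isInfix

theorem isIn_pad_iff (w s : List Char) (hw : w ≠ []) (hsp : ' ' ∉ w) :
    (PySem.Chars.isIn (' ' :: w ++ [' ']) (' ' :: s ++ [' ']) = true) ↔
      w ∈ PySem.Chars.splitOn (' ' :: s ++ [' ']) [' '] := by
  rw [PySem.Chars.isIn_iff_infix, splitOn_eq_fsp]
  constructor
  · exact mem_fsp_of_infix w s hw hsp
  · intro hmem
    have hcons : fsp (' ' :: s ++ [' ']) = [] :: fsp (s ++ [' ']) := by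
      show fsp (' ' :: (s ++ [' '])) = _
      simp [fsp]
    rw [hcons] at hmem
    have hmem' : w ∈ fsp (s ++ [' ']) := by
      rcases List.mem_cons.mp hmem with heq | h
      · exact absurd heq hw
      · exact h
    exact infix_of_mem_fsp_aux w hw hsp (s ++ [' ']).length (s ++ [' ']) le_rfl ⟨s, rfl⟩ hmem'

-- ===== collapsing A's (list, seen-set) pair fold to a single Set fold =====
theorem foldl_diag {α β : Type} (f : (List β × PySem.Set β) → α → (List β × PySem.Set β))
    (g : List β → α → List β)
    (hfg : ∀ l a, f (l, l) a = (g l a, g l a)) :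
    ∀ (L : List α) (l : List β), L.foldl f (l, l) = (L.foldl g l, L.foldl g l) := by
  intro L
  induction L with
  | nil => intro l; rfl
  | cons a L ih =>
      intro l
      simp only [List.foldl_cons, hfg]
      exact ih (g l a)

theorem add_eq_append (l : List String) (r : String) (h : ¬ (PySem.Set.contains l r = true)) :
    PySem.Set.add l r = l ++ [r] := by
  simp only [PySem.Set.add]
  rw [if_neg h]

theorem innerDiag (l : List String) (action : String) :
    (fun st action =>
        let role := pvNormalize action
        if role ≠ "" ∧ ¬ (PySem.Set.contains st.2 role = true)
        then (st.1 ++ [role], PySem.Set.add st.2 role) else st) (l, l) action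
    = ((fun s action =>
        let role := pvNormalize action
        if role ≠ "" then PySem.Set.add s role else s) l action,
       (fun s action =>
        let role := pvNormalize action
        if role ≠ "" then PySem.Set.add s role else s) l action) := by
  simp only []
  by_cases h1 : pvNormalize action ≠ ""
  · by_cases h2 : PySem.Set.contains l (pvNormalize action) = true
    · rw [if_neg (by tauto), if_pos h1]
      simp only [PySem.Set.add, if_pos h2]
    · rw [if_pos ⟨h1, h2⟩, if_pos h1, add_eq_append _ _ h2]
  · rw [if_neg (by tauto), if_neg h1]

theorem outerDiag (l : List String) (subgoal : List (String × List String)) :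
    (fun st subgoal =>
        ((PySem.Dict.mk subgoal).getD "action_hints" []).foldl
          (fun st action =>
            let role := pvNormalize action
            if role ≠ "" ∧ ¬ (PySem.Set.contains st.2 role = true)
            then (st.1 ++ [role], PySem.Set.add st.2 role) else st)
          st) (l, l) subgoal
    = ((fun s subgoal =>
        ((PySem.Dict.mk subgoal).getD "action_hints" []).foldl
          (fun s action =>
            let role := pvNormalize action
            if role ≠ "" then PySem.Set.add s role else s) s) l subgoal,
       (fun s subgoal =>
        ((PySem.Dict.mk subgoal).getD "action_hints" []).foldl
          (fun s action =>
            let role := pvNormalize action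
            if role ≠ "" then PySem.Set.add s role else s) s) l subgoal) := by
  exact foldl_diag _ _ innerDiag _ l

theorem phase1_eq (dec : List (List (String × List String))) :
    dec.foldl
      (fun st subgoal =>
        ((PySem.Dict.mk subgoal).getD "action_hints" []).foldl
          (fun st action =>
            let role := pvNormalize action
            if role ≠ "" ∧ ¬ (PySem.Set.contains st.2 role = true)
            then (st.1 ++ [role], PySem.Set.add st.2 role) else st)
          st)
      (([] : List String), (PySem.Set.empty : PySem.Set String))
    = (dec.foldl
        (fun s subgoal =>
          ((PySem.Dict.mk subgoal).getD "action_hints" []).foldl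
            (fun s action =>
              let role := pvNormalize action
              if role ≠ "" then PySem.Set.add s role else s) s)
        (PySem.Set.empty : PySem.Set String),
       dec.foldl
        (fun s subgoal =>
          ((PySem.Dict.mk subgoal).getD "action_hints" []).foldl
            (fun s action =>
              let role := pvNormalize action
              if role ≠ "" then PySem.Set.add s role else s) s)
        (PySem.Set.empty : PySem.Set String)) := by
  exact foldl_diag _ _ outerDiag dec []

theorem phase2Diag (lowered : List Char) (l : List String) (tr : List Char × String) :
    (fun st tr =>
        if PySem.Chars.isIn (' ' :: tr.1 ++ [' ']) (' ' :: lowered ++ [' ']) = true ∧ ¬ (PySem.Set.contains st.2 tr.2 = true)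
        then (st.1 ++ [tr.2], PySem.Set.add st.2 tr.2) else st) (l, l) tr
    = ((fun l tr =>
        if PySem.Chars.isIn (' ' :: tr.1 ++ [' ']) (' ' :: lowered ++ [' ']) = true ∧ ¬ (PySem.Set.contains l tr.2 = true)
        then l ++ [tr.2] else l) l tr,
       (fun l tr =>
        if PySem.Chars.isIn (' ' :: tr.1 ++ [' ']) (' ' :: lowered ++ [' ']) = true ∧ ¬ (PySem.Set.contains l tr.2 = true)
        then l ++ [tr.2] else l) l tr) := by
  simp only []
  by_cases h : PySem.Chars.isIn (' ' :: tr.1 ++ [' ']) (' ' :: lowered ++ [' ']) = true ∧ ¬ (PySem.Set.contains l tr.2 = true)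
  · rw [if_pos h, if_pos h, add_eq_append _ _ h.2]
  · rw [if_neg h, if_neg h]

-- ===== membership characterizations of A's two phases =====
theorem memA (C : List Char × String → Prop) [DecidablePred C] :
    ∀ (L : List (List Char × String)) (l : List String) (r : String),
      r ∈ L.foldl (fun l tr => if C tr ∧ ¬ (PySem.Set.contains l tr.2 = true) then l ++ [tr.2] else l) l
      ↔ r ∈ l ∨ ∃ tr ∈ L, tr.2 = r ∧ C tr := by
  intro L
  induction L with
  | nil => simp
  | cons tr L ih =>
      intro l r
      rw [List.foldl_cons, ih]
      constructor
      · rintro (h | ⟨tr', h1, h2, h3⟩)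
        · by_cases hcnd : C tr ∧ ¬ (PySem.Set.contains l tr.2 = true)
          · rw [if_pos hcnd] at h
            rcases List.mem_append.mp h with h' | h'
            · exact Or.inl h'
            · exact Or.inr ⟨tr, List.mem_cons_self, (List.mem_singleton.mp h').symm, hcnd.1⟩
          · rw [if_neg hcnd] at h
            exact Or.inl h
        · exact Or.inr ⟨tr', List.mem_cons_of_mem _ h1, h2, h3⟩
      · have hsub : l ⊆ (if C tr ∧ ¬ (PySem.Set.contains l tr.2 = true) then l ++ [tr.2] else l) := by
          split
          · exact fun x hx => List.mem_append.mpr (Or.inl hx)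
          · exact fun x hx => hx
        rintro (h | ⟨tr', h1, h2, h3⟩)
        · exact Or.inl (hsub h)
        · rcases List.mem_cons.mp h1 with heq | hmem
          · subst heq
            subst h2
            by_cases hc : PySem.Set.contains l tr'.2 = true
            · exact Or.inl (hsub ((PySem.Set.contains_iff l tr'.2).mp hc))
            · rw [if_pos ⟨h3, hc⟩]
              exact Or.inl (List.mem_append.mpr (Or.inr (List.mem_singleton.mpr rfl)))
          · exact Or.inr ⟨tr', hmem, h2, h3⟩

theorem memInner :
    ∀ (hints : List String) (s : PySem.Set String) (r : String),
      r ∈ hints.foldl (fun s action =>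
            let role := pvNormalize action
            if role ≠ "" then PySem.Set.add s role else s) s
      ↔ r ∈ s ∨ ∃ a ∈ hints, pvNormalize a = r ∧ r ≠ "" := by
  intro hints
  induction hints with
  | nil => simp
  | cons a hints ih =>
      intro s r
      rw [List.foldl_cons, ih]
      have hstep : r ∈ (if pvNormalize a ≠ "" then PySem.Set.add s (pvNormalize a) else s)
          ↔ r ∈ s ∨ (pvNormalize a = r ∧ r ≠ "") := by
        by_cases h1 : pvNormalize a ≠ ""
        · rw [if_pos h1, PySem.Set.mem_add]
          constructor
          · rintro (h | rfl)
            · exact Or.inl h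
            · exact Or.inr ⟨rfl, h1⟩
          · rintro (h | ⟨h2, _⟩)
            · exact Or.inl h
            · exact Or.inr h2.symm
        · rw [if_neg h1]
          constructor
          · exact Or.inl
          · rintro (h | ⟨h2, h3⟩)
            · exact h
            · exact absurd (h2 ▸ (not_not.mp h1)) h3
      constructor
      · rintro (h | ⟨a', h1, h2⟩)
        · rcases hstep.mp h with h | h
          · exact Or.inl h
          · exact Or.inr ⟨a, List.mem_cons_self, h⟩
        · exact Or.inr ⟨a', List.mem_cons_of_mem _ h1, h2⟩
      · rintro (h | ⟨a', h1, h2⟩)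
        · exact Or.inl (hstep.mpr (Or.inl h))
        · rcases List.mem_cons.mp h1 with heq | hmem
          · exact Or.inl (hstep.mpr (Or.inr (heq ▸ h2)))
          · exact Or.inr ⟨a', hmem, h2⟩

theorem memPhase1 :
    ∀ (dec : List (List (String × List String))) (s : PySem.Set String) (r : String),
      r ∈ dec.foldl
          (fun s subgoal =>
            ((PySem.Dict.mk subgoal).getD "action_hints" []).foldl
              (fun s action =>
                let role := pvNormalize action
                if role ≠ "" then PySem.Set.add s role else s) s) s
      ↔ r ∈ s ∨ ∃ sg ∈ dec, ∃ a ∈ (PySem.Dict.mk sg).getD "action_hints" [], pvNormalize a = r ∧ r ≠ "" := by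
  intro dec
  induction dec with
  | nil => simp
  | cons sg dec ih =>
      intro s r
      rw [List.foldl_cons, ih]
      rw [memInner]
      constructor
      · rintro ((h | ⟨a, h1, h2⟩) | ⟨sg', h1, h2⟩)
        · exact Or.inl h
        · exact Or.inr ⟨sg, List.mem_cons_self, a, h1, h2⟩
        · exact Or.inr ⟨sg', List.mem_cons_of_mem _ h1, h2⟩
      · rintro (h | ⟨sg', h1, h2⟩)
        · exact Or.inl (Or.inl h)
        · rcases List.mem_cons.mp h1 with heq | hmem
          · exact Or.inl (Or.inr (heq ▸ h2))
          · exact Or.inr ⟨sg', hmem, h2⟩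

-- ===== nodup =====
theorem nodup_foldl {α β : Type} (step : List β → α → List β)
    (h : ∀ s a, s.Nodup → (step s a).Nodup) :
    ∀ (L : List α) (s : List β), s.Nodup → (L.foldl step s).Nodup := by
  intro L
  induction L with
  | nil => intro s hs; exact hs
  | cons a L ih => intro s hs; exact ih _ (h s a hs)

theorem nodup_innerB (hints : List String) (s : List String) (h : s.Nodup) :
    (hints.foldl (fun s action =>
        let role := pvNormalize action
        if role ≠ "" then PySem.Set.add s role else s) s).Nodup := by
  refine nodup_foldl _ ?_ hints s h
  intro s a hs
  simp only []
  split
  · exact PySem.Set.nodup_add s _ hs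
  · exact hs

theorem nodup_R (dec : List (List (String × List String))) :
    (dec.foldl
      (fun s subgoal =>
        ((PySem.Dict.mk subgoal).getD "action_hints" []).foldl
          (fun s action =>
            let role := pvNormalize action
            if role ≠ "" then PySem.Set.add s role else s) s)
      (PySem.Set.empty : PySem.Set String)).Nodup := by
  refine nodup_foldl _ ?_ dec _ List.nodup_nil
  intro s a hs
  exact nodup_innerB _ s hs

theorem nodup_A (C : List Char × String → Prop) [DecidablePred C]
    (L : List (List Char × String)) (l : List String) (h : l.Nodup) :
    (L.foldl (fun l tr => if C tr ∧ ¬ (PySem.Set.contains l tr.2 = true) then l ++ [tr.2] else l) l).Nodup := by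
  refine nodup_foldl _ ?_ L l h
  intro s tr hs
  split
  · rename_i hc
    have hnm : tr.2 ∉ s := fun hm => hc.2 ((PySem.Set.contains_iff s tr.2).mpr hm)
    simp only [List.nodup_append, List.nodup_singleton, true_and]
    refine ⟨hs, ?_⟩
    intro a ha b hb hab
    rw [List.mem_singleton] at hb
    subst hb
    exact hnm (hab ▸ ha)
  · exact hs

-- ===== facts about the two literal tables (checked by `decide`) =====
theorem key_facts : ∀ tr ∈ pvAliases, tr.1 ≠ [] ∧ ' ' ∉ tr.1 := by decide

theorem keys_nodup : (PySem.Dict.mk pvAliases).keys.Nodup := by decide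

theorem values_ne_empty : ∀ tr ∈ pvAliases, tr.2 ≠ "" := by decide

theorem aliases_to_tokens : ∀ tr ∈ pvAliases, ∃ e ∈ pvRoleTokens, tr.2 = e.1 ∧ tr.1 ∈ e.2 := by decide

theorem tokens_to_aliases : ∀ e ∈ pvRoleTokens, ∀ t ∈ e.2, (t, e.1) ∈ pvAliases := by decide

theorem roles_nodup : (pvRoleTokens.map Prod.fst).Nodup := by decide

theorem roles_pri_sorted :
    (pvRoleTokens.map Prod.fst).Pairwise (fun a b => pvPriority.getD a 99 < pvPriority.getD b 99) := by
  decide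

-- (t, r) is an alias pair  ↔  token t names role r in the reverse index
theorem pair_iff (t : List Char) (r : String) :
    (t, r) ∈ pvAliases ↔ ∃ e ∈ pvRoleTokens, e.1 = r ∧ t ∈ e.2 := by
  constructor
  · intro h
    obtain ⟨e, he, h1, h2⟩ := aliases_to_tokens (t, r) h
    exact ⟨e, he, h1.symm, h2⟩
  · rintro ⟨e, he, rfl, ht⟩
    exact tokens_to_aliases e he t ht

-- pvNormalize hits role r  ↔  the normalized key is an alias of r
theorem normalize_iff (a : String) (r : String) :
    (pvNormalize a = r ∧ r ≠ "") ↔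
      (PySem.Chars.lower (PySem.Chars.strip a.toList), r) ∈ pvAliases := by
  rw [pvNormalize, PySem.Dict.getD_eq_get?_getD,
    ← PySem.Dict.get?_eq_some_iff_mem_items _ _ _ keys_nodup]
  cases hg : (PySem.Dict.mk pvAliases).get? (PySem.Chars.lower (PySem.Chars.strip a.toList)) with
  | none => simp
  | some v =>
      have hv : v ≠ "" :=
        values_ne_empty _ ((PySem.Dict.get?_eq_some_iff_mem_items _ _ _ keys_nodup).mp hg)
      simp only [Option.getD_some, Option.some.injEq]
      constructor
      · rintro ⟨rfl, _⟩; rfl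
      · rintro rfl; exact ⟨rfl, hv⟩

-- ===== relating the sort to the fixed priority-ordered list =====
theorem cmp_eq (p : String → Int) (a b : String) :
    (decide (p a < p b) || (!decide (p b < p a) && decide (a < b)))
    = decide ((toLex ((p a, a) : Int × String) : Lex (Int × String)) < toLex ((p b, b) : Int × String)) := by
  by_cases h1 : p a < p b
  · simp [h1, Prod.Lex.lt_iff]
  · by_cases h2 : p b < p a
    · simp [h1, h2, Prod.Lex.lt_iff]
      omega
    · have he : p a = p b := le_antisymm (not_lt.mp h2) (not_lt.mp h1)
      by_cases h3 : a < b <;> simp [h1, h2, h3, Prod.Lex.lt_iff, he]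

theorem sorted2_eq_sorted_lex (xs : List String) (p : String → Int) :
    PySem.List.sorted2 xs p (fun r => r)
    = PySem.List.sorted xs (fun r => (toLex ((p r, r) : Int × String) : Lex (Int × String))) := by
  simp only [PySem.List.sorted2, PySem.List.sorted]
  have : (fun (a b : String) => decide (p a < p b) || (!decide (p b < p a) && decide (a < b)))
      = fun a b => decide ((toLex ((p a, a) : Int × String) : Lex (Int × String)) < toLex ((p b, b) : Int × String)) := by
    funext a b
    exact cmp_eq p a b
  rw [if_neg (by simp), if_neg (by simp), this]

-- B's output is strictly increasing under A's (priority, role) lex sort key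
theorem bout_pairwise (pred : String × List (List Char) → Bool) :
    ((pvRoleTokens.filter pred).map Prod.fst).Pairwise
      (fun a b => (toLex ((pvPriority.getD a 99, a) : Int × String) : Lex (Int × String))
        < toLex ((pvPriority.getD b 99, b) : Int × String)) := by
  have hsub : ((pvRoleTokens.filter pred).map Prod.fst).Sublist (pvRoleTokens.map Prod.fst) :=
    List.filter_sublist.map Prod.fst
  exact (roles_pri_sorted.imp (fun h => Prod.Lex.lt_iff.mpr (Or.inl h))).sublist hsub

theorem bout_nodup (pred : String × List (List Char) → Bool) :
    ((pvRoleTokens.filter pred).map Prod.fst).Nodup :=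
  roles_nodup.sublist (List.filter_sublist.map Prod.fst)

-- membership in B's output
theorem mem_bout (words : PySem.Set (List Char)) (r : String) :
    r ∈ (pvRoleTokens.filter (fun rt => rt.2.any (fun t => PySem.Set.contains words t))).map Prod.fst
    ↔ ∃ e ∈ pvRoleTokens, e.1 = r ∧ ∃ t ∈ e.2, t ∈ words := by
  simp only [List.mem_map, List.mem_filter, List.any_eq_true]
  constructor
  · rintro ⟨e, ⟨he, t, ht, hw⟩, rfl⟩
    exact ⟨e, he, rfl, t, ht, (PySem.Set.contains_iff words t).mp hw⟩
  · rintro ⟨e, he, rfl, t, ht, hw⟩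
    exact ⟨e, ⟨he, t, ht, (PySem.Set.contains_iff words t).mpr hw⟩, rfl⟩

theorem mem_hintWords (dec : List (List (String × List String))) (t : List Char) :
    t ∈ dec.flatMap (fun sg =>
        ((PySem.Dict.mk sg).getD "action_hints" []).map
          (fun a => PySem.Chars.lower (PySem.Chars.strip a.toList)))
    ↔ ∃ sg ∈ dec, ∃ a ∈ (PySem.Dict.mk sg).getD "action_hints" [],
        PySem.Chars.lower (PySem.Chars.strip a.toList) = t := by
  simp [List.mem_flatMap, List.mem_map, eq_comm]

-- the central membership equivalence: A's collected list and B's filtered list hold the same roles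
theorem mem_iff (text : String) (dec : List (List (String × List String))) (r : String) :
    r ∈ pvAliases.foldl
        (fun l tr =>
          if PySem.Chars.isIn (' ' :: tr.1 ++ [' ']) (' ' :: PySem.Chars.lower text.toList ++ [' ']) = true
              ∧ ¬ (PySem.Set.contains l tr.2 = true)
          then l ++ [tr.2] else l)
        (dec.foldl
          (fun s subgoal =>
            ((PySem.Dict.mk subgoal).getD "action_hints" []).foldl
              (fun s action =>
                let role := pvNormalize action
                if role ≠ "" then PySem.Set.add s role else s) s)
          (PySem.Set.empty : PySem.Set String))
    ↔ r ∈ (pvRoleTokens.filter (fun rt => rt.2.any (fun t =>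
          PySem.Set.contains
            (PySem.Set.update
              (PySem.Set.ofList (dec.flatMap (fun sg =>
                ((PySem.Dict.mk sg).getD "action_hints" []).map
                  (fun a => PySem.Chars.lower (PySem.Chars.strip a.toList)))))
              (PySem.Chars.splitOn (' ' :: PySem.Chars.lower text.toList ++ [' ']) [' '])) t))).map Prod.fst := by
  rw [memA _ pvAliases _ r, memPhase1, mem_bout]
  simp only [PySem.Set.mem_update, PySem.Set.mem_ofList, PySem.Set.empty, List.not_mem_nil, false_or]
  constructor
  · rintro (⟨sg, hsg, a, ha, hn⟩ | ⟨tr, htr, rfl, hin⟩)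
    · obtain ⟨e, he, h1, h2⟩ := pair_iff _ r |>.mp ((normalize_iff a r).mp hn)
      exact ⟨e, he, h1, _, h2, Or.inl ((mem_hintWords dec _).mpr ⟨sg, hsg, a, ha, rfl⟩)⟩
    · obtain ⟨hne, hsp⟩ := key_facts tr htr
      obtain ⟨e, he, h1, h2⟩ := pair_iff tr.1 tr.2 |>.mp htr
      exact ⟨e, he, h1, tr.1, h2, Or.inr ((isIn_pad_iff tr.1 _ hne hsp).mp hin)⟩
  · rintro ⟨e, he, rfl, t, ht, hw | hw⟩
    · obtain ⟨sg, hsg, a, ha, hta⟩ := (mem_hintWords dec t).mp hw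
      refine Or.inl ⟨sg, hsg, a, ha, (normalize_iff a e.1).mpr ?_⟩
      rw [hta]
      exact (pair_iff t e.1).mpr ⟨e, he, rfl, ht⟩
    · have hmem : (t, e.1) ∈ pvAliases := (pair_iff t e.1).mpr ⟨e, he, rfl, ht⟩
      obtain ⟨hne, hsp⟩ := key_facts (t, e.1) hmem
      exact Or.inr ⟨(t, e.1), hmem, rfl, (isIn_pad_iff t _ hne hsp).mpr hw⟩

theorem ports_agree (text : String) (decomposition : Option (List (List (String × List String)))) :
    semantic_action_roles text decomposition = semantic_action_roles_alt text decomposition := by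
  unfold semantic_action_roles semantic_action_roles_alt
  simp only [phase1_eq]
  rw [foldl_diag _ _ (phase2Diag (PySem.Chars.lower text.toList))]
  simp only []
  rw [sorted2_eq_sorted_lex]
  apply PySem.List.sorted_eq_of_perm_of_pairwise_lt
  · refine (List.perm_ext_iff_of_nodup (bout_nodup _) ?_).mpr ?_
    · exact nodup_A _ pvAliases _ (nodup_R _)
    · intro r
      exact (mem_iff text (decomposition.getD []) r).symm
  · exact bout_pairwise _
-- ===== VERDICT (by name: the statement is the Claim_ definition above) =====
theorem semantic_action_roles_spec : Claim_equal_semantic_action_roles := by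
  intro text decomposition _hdom
  unfold Spec_semantic_action_roles
  exact ports_agree text decomposition
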